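-- pv_equiv track=rewrite | github.com/yutsang/python-pptx | scripts/update_mappings_patterns.py | _replace_patterns_block
-- ===== SOURCE A (Python) =====
-- def _replace_patterns_block(item_lines: list[str], new_block: list[str]) -> list[str]:
--     """Rewrite the existing `  patterns:` block in this item's slice, or append."""
--     out: list[str] = []
--     skipping = False
--     replaced = False
--     for line in item_lines:
--         if not skipping and line.startswith("  patterns:"):
--             out.extend(new_block)
--             skipping = True
--             replaced = True
--             continue
--         if skipping:
--             stripped_indent = line[: len(line) - len(line.lstrip())]
--             # Stay inside the patterns block while it's indented further than 2.
--             if line.strip() == "" or len(stripped_indent) >= 4: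
--                 continue
--             skipping = False
--         out.append(line)
--     if not replaced:
--         # Append at end of slice with a leading newline if needed.
--         if out and not out[-1].endswith("\n"):
--             out[-1] = out[-1] + "\n"
--         out.extend(new_block)
--     return out
-- ===== SOURCE B (Python) =====
-- def _replace_patterns_block(item_lines: list[str], new_block: list[str]) -> list[str]:
--     """Staged re-implementation: stage 1 locates every patterns block as a
--     half-open index interval (start of the '  patterns:' line up to, but not
--     including, its terminator line); stage 2 splices the result together from
--     slices of item_lines with new_block substituted for each interval."""
--     n = len(item_lines)
--
--     def block_end(j: int) -> int:
--         # first index >= j whose line is non-blank and indented < 4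
--         while j < n and (item_lines[j].strip() == ""
--                          or len(item_lines[j]) - len(item_lines[j].lstrip()) >= 4):
--             j += 1
--         return j
--
--     # Stage 1: collect the intervals.
--     intervals: list[tuple[int, int]] = []
--     i = 0
--     while i < n:
--         if item_lines[i].startswith("  patterns:"):
--             e = block_end(i + 1)
--             intervals.append((i, e))
--             i = e + 1  # the terminator line is kept and never re-examined
--         else:
--             i += 1
--
--     # Stage 2: splice.
--     out: list[str] = []
--     prev = 0
--     for s, e in intervals:
--         out += item_lines[prev:s]
--         out += new_block
--         prev = e
--     out += item_lines[prev:]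
--
--     if not intervals:
--         if out and not out[-1].endswith("\n"):
--             out[-1] = out[-1] + "\n"
--         out += new_block
--     return out
-- ===== Notes on version B (the rewrite author's own statement) =====
-- stated objective: alternative
-- what changed: B replaces A's single pass with carried skipping/replaced mode flags by a two-stage algorithm: stage 1 computes the list of half-open index intervals covering each patterns block, stage 2 rebuilds the output by splicing slices of item_lines around new_block at those intervals.
import Mathlib
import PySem

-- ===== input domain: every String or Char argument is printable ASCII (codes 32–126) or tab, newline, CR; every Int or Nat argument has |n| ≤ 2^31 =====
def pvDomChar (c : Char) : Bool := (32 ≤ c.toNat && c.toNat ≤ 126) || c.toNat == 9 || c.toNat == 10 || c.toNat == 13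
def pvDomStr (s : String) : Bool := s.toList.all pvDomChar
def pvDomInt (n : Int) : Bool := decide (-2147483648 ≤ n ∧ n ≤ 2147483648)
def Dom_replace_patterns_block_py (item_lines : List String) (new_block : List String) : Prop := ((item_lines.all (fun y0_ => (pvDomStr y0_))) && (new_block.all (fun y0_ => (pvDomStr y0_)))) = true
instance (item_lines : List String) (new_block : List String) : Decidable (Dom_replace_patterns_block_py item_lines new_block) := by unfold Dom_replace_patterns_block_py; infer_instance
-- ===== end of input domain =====

-- B replaces A's single pass carrying skipping/replaced mode flags by a staged
-- algorithm: stage 1 collects each patterns block as a half-open index interval,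
-- stage 2 splices slices of item_lines around new_block at those intervals;
-- objective: alternative decomposition, same cost, same return value everywhere.

-- ===== PORT A =====
-- the for-loop of A, state (out, skipping, replaced)
def paLoop (new_block : List String) : List String → List String → Bool → Bool → List String × Bool
  | [], out, _skipping, replaced => (out, replaced)
  | line :: rest, out, skipping, replaced =>
    if !skipping && PySem.Str.startswith line "  patterns:" then
      paLoop new_block rest (out ++ new_block) true true
    else if skipping then
      if PySem.Str.strip line = "" ∨ 4 ≤ PySem.Str.len line - PySem.Str.len (PySem.Str.lstrip line) then
        paLoop new_block rest out skipping replaced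
      else
        paLoop new_block rest (out ++ [line]) false replaced
    else
      paLoop new_block rest (out ++ [line]) skipping replaced

def replace_patterns_block_py (item_lines : List String) (new_block : List String) : List String :=
  let p := paLoop new_block item_lines [] false false
  if !p.2 then
    -- `if out and not out[-1].endswith("\n"): out[-1] = out[-1] + "\n"`
    let out := if p.1 ≠ [] ∧ ¬ PySem.Str.endswith (p.1.getLastD "") "\n"
               then p.1.dropLast ++ [p.1.getLastD "" ++ "\n"] else p.1
    out ++ new_block
  else p.1

-- ===== PORT B =====
-- Source B's body-line test: blank, or indented by at least 4
def pbIsBody (line : String) : Bool :=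
  decide (PySem.Str.strip line = "" ∨ 4 ≤ PySem.Str.len line - PySem.Str.len (PySem.Str.lstrip line))

-- Source B's block_end: first index ≥ j whose line is non-blank and indented < 4
def pbBlockEnd (lines : List String) (j : Nat) : Nat :=
  if h : j < lines.length then
    if pbIsBody lines[j] then pbBlockEnd lines (j + 1) else j
  else j
  termination_by lines.length - j

theorem pbBlockEnd_ge (lines : List String) (j : Nat) : j ≤ pbBlockEnd lines j := by
  fun_induction pbBlockEnd lines j with
  | case1 j h hb ih => omega
  | case2 j h hb => exact le_refl _
  | case3 j h => exact le_refl _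

-- Source B's stage 1: collect the patterns-block intervals
def pbFindIntervals (lines : List String) (i : Nat) : List (Nat × Nat) :=
  if h : i < lines.length then
    if PySem.Str.startswith lines[i] "  patterns:" then
      let e := pbBlockEnd lines (i + 1)
      (i, e) :: pbFindIntervals lines (e + 1)
    else pbFindIntervals lines (i + 1)
  else []
  termination_by lines.length - i
  decreasing_by
    · have := pbBlockEnd_ge lines (i + 1); omega
    · omega

-- Source B's stage 2: `for s, e in intervals: out += item_lines[prev:s]; out += new_block; prev = e`
-- followed by `out += item_lines[prev:]`, written as recursion over the interval list
def pbSplice (lines new_block : List String) : List (Nat × Nat) → Nat → List String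
  | [], prev => PySem.List.slice lines (some (prev : Int)) none
  | (s, e) :: rest, prev =>
    PySem.List.slice lines (some (prev : Int)) (some (s : Int)) ++ new_block ++ pbSplice lines new_block rest e

def replace_patterns_block_py_alt (item_lines : List String) (new_block : List String) : List String :=
  let ivs := pbFindIntervals item_lines 0
  let out := pbSplice item_lines new_block ivs 0
  if ivs.isEmpty then
    let out := if out ≠ [] ∧ ¬ PySem.Str.endswith (out.getLastD "") "\n"
               then out.dropLast ++ [out.getLastD "" ++ "\n"] else out
    out ++ new_block
  else out

-- ===== PRECONDITION & SPEC =====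
def Spec_replace_patterns_block_py (item_lines : List String) (new_block : List String) (out : List String) : Prop := out = replace_patterns_block_py_alt item_lines new_block
instance (item_lines : List String) (new_block : List String) (out : List String) : Decidable (Spec_replace_patterns_block_py item_lines new_block out) := by unfold Spec_replace_patterns_block_py; infer_instance

-- ===== CLAIM (what is proved, stated in full; the proofs are below) =====
def Claim_equal_replace_patterns_block_py : Prop := ∀ (item_lines : List String) (new_block : List String), Dom_replace_patterns_block_py item_lines new_block → Spec_replace_patterns_block_py item_lines new_block (replace_patterns_block_py item_lines new_block)

-- ===== LEMMAS AND PROOFS =====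

-- proof-side intermediate: a direct recursion on the suffix of lines, used as a
-- bridge between A's flag-carrying loop and B's interval splicing
def pgSkip : List String → List String
  | [] => []
  | line :: rest => if pbIsBody line then pgSkip rest else line :: rest

theorem pgSkip_length_le (l : List String) : (pgSkip l).length ≤ l.length := by
  induction l with
  | nil => simp [pgSkip]
  | cons x xs ih => simp only [pgSkip]; split <;> simp only [List.length_cons] <;> omega

def pgGo (new_block : List String) : List String → List String × Bool
  | [] => ([], false)
  | head :: rest =>
    if PySem.Str.startswith head "  patterns:" then
      match _h : pgSkip rest with
      | [] => (new_block, true)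
      | t :: rs => (new_block ++ t :: (pgGo new_block rs).1, true)
    else
      ((head :: (pgGo new_block rest).1), (pgGo new_block rest).2)
  termination_by l => l.length
  decreasing_by
    · have := pgSkip_length_le rest
      rw [_h] at this; simp at this ⊢; omega
    · simp

theorem pgGo_start_nil (nb : List String) (head : String) (rest : List String)
    (hs : PySem.Str.startswith head "  patterns:" = true) (h : pgSkip rest = []) :
    pgGo nb (head :: rest) = (nb, true) := by
  rw [pgGo.eq_def]
  simp only [hs]
  rw [if_pos trivial]
  split
  · rfl
  · next t rs h' => rw [h] at h'; cases h'

theorem pgGo_start_cons (nb : List String) (head : String) (rest : List String) (t : String)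
    (rs : List String) (hs : PySem.Str.startswith head "  patterns:" = true)
    (h : pgSkip rest = t :: rs) :
    pgGo nb (head :: rest) = (nb ++ t :: (pgGo nb rs).1, true) := by
  rw [pgGo.eq_def]
  simp only [hs]
  rw [if_pos trivial]
  split
  · next h' => rw [h] at h'; cases h'
  · next t' rs' h' =>
    rw [h] at h'
    injection h' with h1 h2
    subst h1; subst h2; rfl

theorem pgGo_nostart (nb : List String) (head : String) (rest : List String)
    (hs : ¬ PySem.Str.startswith head "  patterns:" = true) :
    pgGo nb (head :: rest) = (head :: (pgGo nb rest).1, (pgGo nb rest).2) := by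
  rw [pgGo.eq_def]
  simp only []
  rw [if_neg hs]

-- ---- A's loop computes pgGo ----

theorem paLoop_cons_start (nb : List String) (line : String) (rest out : List String) (replaced : Bool)
    (hs : PySem.Str.startswith line "  patterns:" = true) :
    paLoop nb (line :: rest) out false replaced = paLoop nb rest (out ++ nb) true true := by
  simp only [paLoop, hs, Bool.not_false, Bool.true_and]
  rw [if_pos trivial]

theorem paLoop_cons_nostart (nb : List String) (line : String) (rest out : List String) (replaced : Bool)
    (hs : ¬ PySem.Str.startswith line "  patterns:" = true) :
    paLoop nb (line :: rest) out false replaced = paLoop nb rest (out ++ [line]) false replaced := by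
  simp only [paLoop, Bool.not_false, Bool.true_and]
  rw [if_neg hs, if_neg (by simp)]

-- while skipping, A drops exactly the lines pgSkip drops; the terminator line
-- (if any) is appended and skipping mode is left
theorem paLoop_skip_nil (nb : List String) : ∀ (rest out : List String) (replaced : Bool),
    pgSkip rest = [] → paLoop nb rest out true replaced = (out, replaced) := by
  intro rest
  induction rest with
  | nil => intro out replaced _; rfl
  | cons line rest ih =>
    intro out replaced h
    simp only [pgSkip] at h
    by_cases hc : PySem.Str.strip line = "" ∨ 4 ≤ PySem.Str.len line - PySem.Str.len (PySem.Str.lstrip line)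
    · rw [if_pos (by simpa [pbIsBody] using hc)] at h
      simp only [paLoop]
      rw [if_neg (by simp), if_pos trivial, if_pos hc]
      exact ih out replaced h
    · rw [if_neg (by simpa [pbIsBody] using hc)] at h; cases h

theorem paLoop_skip_cons (nb : List String) : ∀ (rest : List String) (t : String) (rs out : List String) (replaced : Bool),
    pgSkip rest = t :: rs → paLoop nb rest out true replaced = paLoop nb rs (out ++ [t]) false replaced := by
  intro rest
  induction rest with
  | nil => intro t rs out replaced h; cases h
  | cons line rest ih =>
    intro t rs out replaced h
    simp only [pgSkip] at h
    by_cases hc : PySem.Str.strip line = "" ∨ 4 ≤ PySem.Str.len line - PySem.Str.len (PySem.Str.lstrip line)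
    · rw [if_pos (by simpa [pbIsBody] using hc)] at h
      simp only [paLoop]
      rw [if_neg (by simp), if_pos trivial, if_pos hc]
      exact ih t rs out replaced h
    · rw [if_neg (by simpa [pbIsBody] using hc)] at h
      injection h with h1 h2
      subst h1; subst h2
      simp only [paLoop]
      rw [if_neg (by simp), if_pos trivial, if_neg hc]

theorem paLoop_go (nb : List String) : ∀ (n : Nat) (lines : List String), lines.length ≤ n →
    ∀ (out : List String) (replaced : Bool),
      paLoop nb lines out false replaced =
        (out ++ (pgGo nb lines).1, replaced || (pgGo nb lines).2) := by
  intro n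
  induction n with
  | zero =>
    intro lines hlen out replaced
    have : lines = [] := List.length_eq_zero_iff.mp (Nat.le_zero.mp hlen)
    subst this; simp [paLoop, pgGo]
  | succ n ih =>
    intro lines hlen out replaced
    match lines with
    | [] => simp [paLoop, pgGo]
    | head :: rest =>
      simp only [List.length_cons, Nat.succ_le_succ_iff] at hlen
      by_cases hs : PySem.Str.startswith head "  patterns:" = true
      · rw [paLoop_cons_start nb head rest out replaced hs]
        cases h : pgSkip rest with
        | nil =>
          rw [paLoop_skip_nil nb rest (out ++ nb) true h, pgGo_start_nil nb head rest hs h]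
          simp
        | cons t rs =>
          have hrs : rs.length ≤ n := by
            have := pgSkip_length_le rest
            rw [h] at this; simp at this; omega
          rw [paLoop_skip_cons nb rest t rs (out ++ nb) true h, ih rs hrs,
            pgGo_start_cons nb head rest t rs hs h]
          simp
      · rw [paLoop_cons_nostart nb head rest out replaced hs, ih rest hlen,
          pgGo_nostart nb head rest hs]
        simp

-- ---- B's stages compute pgGo ----

-- pbBlockEnd walks exactly the lines pgSkip drops
theorem pgSkip_drop (lines : List String) : ∀ (j : Nat),
    pgSkip (lines.drop j) = lines.drop (pbBlockEnd lines j) := by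
  intro j
  fun_induction pbBlockEnd lines j with
  | case1 j h hb ih =>
    rw [List.drop_eq_getElem_cons h]
    simp only [pgSkip]
    rw [if_pos hb]
    exact ih
  | case2 j h hb =>
    rw [List.drop_eq_getElem_cons h]
    simp only [pgSkip]
    rw [if_neg hb]
  | case3 j h =>
    have : lines.length ≤ j := by omega
    rw [List.drop_of_length_le this]
    rfl

theorem pbBlockEnd_le (lines : List String) (j : Nat) (hj : j ≤ lines.length) :
    pbBlockEnd lines j ≤ lines.length := by
  fun_induction pbBlockEnd lines j with
  | case1 j h hb ih => exact ih (by omega)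
  | case2 j h hb => omega
  | case3 j h => omega

-- slice bookkeeping: lines[prev:i] ++ [lines[i]] = lines[prev:i+1]
theorem slice_snoc (lines : List String) (prev i : Nat) (hp : prev ≤ i) (hi : i < lines.length) :
    PySem.List.slice lines (some (prev : Int)) (some (i : Int)) ++ [lines[i]] =
      PySem.List.slice lines (some (prev : Int)) (some ((i + 1 : Nat) : Int)) := by
  rw [PySem.List.slice_natCast, PySem.List.slice_natCast]
  have h1 : i - prev < (lines.drop prev).length := by simp; omega
  have h2 : (lines.drop prev)[i - prev] = lines[i] := by
    rw [List.getElem_drop]; congr 1; omega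
  rw [show i + 1 - prev = (i - prev) + 1 by omega, List.take_add_one,
    List.getElem?_eq_getElem h1, h2]
  rfl

-- the main invariant: splicing the intervals found from i, with pending slice
-- start prev ≤ i, yields lines[prev:i] ++ pgGo's output on the suffix from i;
-- and the interval list is empty iff pgGo reports no replacement
theorem splice_findIntervals (lines nb : List String) : ∀ (n i : Nat), lines.length - i ≤ n → i ≤ lines.length →
    (∀ prev : Nat, prev ≤ i →
      pbSplice lines nb (pbFindIntervals lines i) prev =
        PySem.List.slice lines (some (prev : Int)) (some (i : Int)) ++ (pgGo nb (lines.drop i)).1) ∧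
    ((pbFindIntervals lines i).isEmpty = !(pgGo nb (lines.drop i)).2) := by
  intro n
  induction n with
  | zero =>
    intro i hn hi
    have hlen : i = lines.length := by omega
    subst hlen
    rw [List.drop_of_length_le (le_refl _)]
    unfold pbFindIntervals
    rw [dif_neg (by omega)]
    constructor
    · intro prev hp
      simp only [pbSplice, pgGo]
      rw [PySem.List.slice_from_natCast, PySem.List.slice_natCast,
        List.take_of_length_le (by simp)]
      simp
    · simp [pgGo]
  | succ n ih =>
    intro i hn hi
    by_cases h : i < lines.length
    · have hdrop : lines.drop i = lines[i] :: lines.drop (i + 1) := List.drop_eq_getElem_cons h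
      by_cases hs : PySem.Str.startswith lines[i] "  patterns:" = true
      · -- a block starts at i
        unfold pbFindIntervals
        rw [dif_pos h, if_pos hs]
        have he1 : i + 1 ≤ pbBlockEnd lines (i + 1) := pbBlockEnd_ge lines (i + 1)
        have he2 : pbBlockEnd lines (i + 1) ≤ lines.length := pbBlockEnd_le lines (i + 1) (by omega)
        set e := pbBlockEnd lines (i + 1) with hedef
        have hskip : pgSkip (lines.drop (i + 1)) = lines.drop e := pgSkip_drop lines (i + 1)
        by_cases hee : e < lines.length
        · -- terminator line exists at index e
          have hde : lines.drop e = lines[e] :: lines.drop (e + 1) := List.drop_eq_getElem_cons hee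
          rw [hde] at hskip
          have hgo : pgGo nb (lines.drop i) = (nb ++ lines[e] :: (pgGo nb (lines.drop (e + 1))).1, true) := by
            rw [hdrop]; exact pgGo_start_cons nb _ _ _ _ hs hskip
          have hih := ih (e + 1) (by omega) (by omega)
          constructor
          · intro prev hp
            simp only [pbSplice]
            rw [hih.1 e (by omega), hgo]
            have hsl : PySem.List.slice lines (some (e : Int)) (some ((e + 1 : Nat) : Int)) = [lines[e]] := by
              rw [PySem.List.slice_natCast]
              rw [show e + 1 - e = 1 by omega, List.take_one, List.head?_drop,
                List.getElem?_eq_getElem hee]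
              rfl
            rw [hsl]
            simp
          · rw [hgo]; simp
        · -- block runs to the end of lines
          have hel : e = lines.length := by omega
          have hnil : pgSkip (lines.drop (i + 1)) = [] := by
            rw [hskip, hel, List.drop_length]
          have hgo : pgGo nb (lines.drop i) = (nb, true) := by
            rw [hdrop]; exact pgGo_start_nil nb _ _ hs hnil
          have hrest : pbFindIntervals lines (e + 1) = [] := by
            unfold pbFindIntervals; rw [dif_neg (by omega)]
          constructor
          · intro prev hp
            simp only [pbSplice, hrest]
            rw [hgo, PySem.List.slice_from_natCast, hel, List.drop_length]
            simp
          · rw [hgo]; simp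
      · -- ordinary line at i
        unfold pbFindIntervals
        rw [dif_pos h, if_neg hs]
        have hgo : pgGo nb (lines.drop i) =
            (lines[i] :: (pgGo nb (lines.drop (i + 1))).1, (pgGo nb (lines.drop (i + 1))).2) := by
          rw [hdrop]; exact pgGo_nostart nb _ _ hs
        have hih := ih (i + 1) (by omega) (by omega)
        constructor
        · intro prev hp
          rw [hih.1 prev (by omega), hgo, ← slice_snoc lines prev i hp h]
          simp
        · rw [hih.2, hgo]
    · -- i = lines.length: no further intervals
      have hlen : i = lines.length := by omega
      subst hlen
      rw [List.drop_of_length_le (le_refl _)]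
      unfold pbFindIntervals
      rw [dif_neg (by omega)]
      constructor
      · intro prev hp
        simp only [pbSplice, pgGo]
        rw [PySem.List.slice_from_natCast, PySem.List.slice_natCast,
          List.take_of_length_le (by simp)]
        simp
      · simp [pgGo]

-- ===== VERDICT (by name: the statement is the Claim_ definition above) =====
theorem replace_patterns_block_py_spec : Claim_equal_replace_patterns_block_py := by
  intro item_lines new_block _
  show replace_patterns_block_py item_lines new_block = replace_patterns_block_py_alt item_lines new_block
  unfold replace_patterns_block_py replace_patterns_block_py_alt
  rw [paLoop_go new_block item_lines.length item_lines (le_refl _)]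
  have h := splice_findIntervals item_lines new_block item_lines.length 0 (by omega) (by omega)
  have h1 := h.1 0 (le_refl _)
  have h2 := h.2
  simp only [List.drop_zero] at h1 h2
  rw [PySem.List.slice_natCast] at h1
  simp only [Nat.sub_self, List.take_zero, List.drop_zero, List.nil_append] at h1
  simp only [List.nil_append, Bool.false_or, h1, h2]
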